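-- pv_equiv track=rewrite | github.com/hyerania/BeladyCacheReplacement | Hawkeye-Python code/helper_function.py | CRC
-- ===== SOURCE A (Python) =====
-- def CRC(block_address):
--     crcPolynomial = 3988292384
--     return_val = block_address
--     for i in range(32):
--         if return_val & 1:
--             return_val = (return_val >> 1) ^ crcPolynomial
--         else:
--             return_val >>= 1
--     return return_val
-- ===== SOURCE B (Python) =====
-- def _make_table():
--     poly = 3988292384
--     table = []
--     for b in range(256):
--         r = b
--         for _ in range(8):
--             r = ((r >> 1) ^ poly) if (r & 1) else (r >> 1)
--         table.append(r)
--     return table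
--
-- _CRC_TABLE = _make_table()
--
-- def CRC(block_address):
--     crc = block_address
--     for _ in range(4):
--         crc = (crc >> 8) ^ _CRC_TABLE[crc & 0xFF]
--     return crc
-- ===== Notes on version B (the rewrite author's own statement) =====
-- stated objective: alternative
-- what changed: Replaces the per-call loop of thirty-two single-bit CRC steps by the classic table-driven variant: a byte-indexed lookup table precomputed once at module load, then four byte-level steps crc = (crc >> 8) ^ T[crc & 0xFF] per call.
import Mathlib
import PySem

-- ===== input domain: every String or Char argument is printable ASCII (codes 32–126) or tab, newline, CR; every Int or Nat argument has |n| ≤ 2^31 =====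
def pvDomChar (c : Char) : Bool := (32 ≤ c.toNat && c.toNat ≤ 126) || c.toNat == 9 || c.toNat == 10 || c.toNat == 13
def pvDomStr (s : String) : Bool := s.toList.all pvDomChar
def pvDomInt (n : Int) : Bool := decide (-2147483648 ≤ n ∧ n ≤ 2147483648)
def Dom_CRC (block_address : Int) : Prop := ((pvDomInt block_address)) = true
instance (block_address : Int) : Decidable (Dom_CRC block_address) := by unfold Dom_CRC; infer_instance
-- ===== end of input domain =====

-- B replaces A's per-call loop of single-bit CRC steps by a byte-wise lookup table built once plus four byte-level steps per call.

-- ===== PORT A =====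
-- one single-bit step per loop iteration: shift right, conditional XOR with the polynomial.
def CRC (block_address : Int) : Int :=
  List.foldl
    (fun return_val _ =>
      if PySem.Int.band return_val 1 ≠ 0 then
        PySem.Int.bxor (return_val >>> (1:Nat)) 3988292384
      else
        return_val >>> (1:Nat))
    block_address (PySem.List.pyRange 0 32)

-- ===== PORT B =====
-- Source B's module-level _CRC_TABLE = _make_table(): each entry is the single-bit step applied eight times to its byte index.
def pvCrcTable : List Int :=
  List.map
    (fun b =>
      List.foldl
        (fun r _ =>
          if PySem.Int.band r 1 ≠ 0 then PySem.Int.bxor (r >>> (1:Nat)) 3988292384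
          else r >>> (1:Nat))
        b (PySem.List.pyRange 0 8))
    (PySem.List.pyRange 0 256)

-- table[crc & 0xFF]: the index is always in [0, 256), so pyGetD with default 0 is exact here.
def CRC_alt (block_address : Int) : Int :=
  List.foldl
    (fun crc _ =>
      PySem.Int.bxor (crc >>> (8:Nat))
        (PySem.List.pyGetD pvCrcTable (PySem.Int.band crc 255) 0))
    block_address (PySem.List.pyRange 0 4)

-- ===== PRECONDITION & SPEC =====
def Spec_CRC (block_address : Int) (out : Int) : Prop := out = CRC_alt block_address
instance (block_address : Int) (out : Int) : Decidable (Spec_CRC block_address out) := by unfold Spec_CRC; infer_instance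

-- ===== CLAIM (what is proved, stated in full; the proofs are below) =====
def Claim_equal_CRC : Prop := ∀ (block_address : Int), Dom_CRC block_address → Spec_CRC block_address (CRC block_address)

-- ===== LEMMAS AND PROOFS =====

-- the single-bit CRC step, and iteration of a step function
def pvStep (x : Int) : Int :=
  if PySem.Int.band x 1 ≠ 0 then PySem.Int.bxor (x >>> (1:Nat)) 3988292384 else x >>> (1:Nat)

def pvIter (f : Int → Int) : Nat → Int → Int
  | 0, x => x
  | n + 1, x => pvIter f n (f x)

lemma pvIter_add (f : Int → Int) (m n : Nat) (x : Int) :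
    pvIter f (m + n) x = pvIter f n (pvIter f m x) := by
  induction m generalizing x with
  | zero => rw [Nat.zero_add]; rfl
  | succ m ih => rw [Nat.succ_add]; exact ih (f x)

lemma pvFoldl_iter (f : Int → Int) (l : List Int) (x : Int) :
    List.foldl (fun a _ => f a) x l = pvIter f l.length x := by
  induction l generalizing x with
  | nil => rfl
  | cons h t ih => simp [pvIter, ih]

-- ---- bit-level toolbox for Python's infinite two's-complement integers ----

lemma pv_tb_coe (n i : Nat) : (Int.ofNat n).testBit i = n.testBit i := rfl

lemma pv_tb_cast (n i : Nat) : ((n : Int)).testBit i = n.testBit i := rfl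

lemma pv_tb_negSucc (n i : Nat) : (Int.negSucc n).testBit i = !n.testBit i := rfl

lemma pv_int_ext {x y : Int} (h : ∀ i, x.testBit i = y.testBit i) : x = y := by
  cases x with
  | ofNat m =>
    cases y with
    | ofNat k => exact congrArg Int.ofNat (Nat.eq_of_testBit_eq fun i => h i)
    | negSucc k =>
      exfalso
      have h1 := h (m + k)
      rw [pv_tb_coe, pv_tb_negSucc,
        Nat.testBit_lt_two_pow (lt_of_le_of_lt (Nat.le_add_right m k) Nat.lt_two_pow_self),
        Nat.testBit_lt_two_pow (lt_of_le_of_lt (Nat.le_add_left k m) Nat.lt_two_pow_self)] at h1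
      simp at h1
  | negSucc m =>
    cases y with
    | ofNat k =>
      exfalso
      have h1 := h (m + k)
      rw [pv_tb_coe, pv_tb_negSucc,
        Nat.testBit_lt_two_pow (lt_of_le_of_lt (Nat.le_add_right m k) Nat.lt_two_pow_self),
        Nat.testBit_lt_two_pow (lt_of_le_of_lt (Nat.le_add_left k m) Nat.lt_two_pow_self)] at h1
      simp at h1
    | negSucc k =>
      have : m = k := Nat.eq_of_testBit_eq fun i => by
        have h1 := h i; rw [pv_tb_negSucc, pv_tb_negSucc] at h1
        exact Bool.not_inj h1
      rw [this]

lemma pv_negSucc_inv (n : Nat) : -Int.negSucc n - 1 = (n : Int) := by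
  rw [Int.negSucc_eq]; ring

lemma pv_neg_coe_sub_one (n : Nat) : -(n : Int) - 1 = Int.negSucc n := by
  rw [Int.negSucc_eq]; ring

lemma pv_tb_shiftRight (a : Int) (n i : Nat) : (a >>> n).testBit i = a.testBit (n + i) := by
  cases a with
  | ofNat m => exact Nat.testBit_shiftRight m
  | negSucc m =>
    show (!(m >>> n).testBit i) = !m.testBit (n + i)
    rw [Nat.testBit_shiftRight]

lemma pv_tb_bxor (a b : Int) (i : Nat) :
    (PySem.Int.bxor a b).testBit i = xor (a.testBit i) (b.testBit i) := by
  cases a with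
  | ofNat m =>
    cases b with
    | ofNat k =>
      simp only [PySem.Int.bxor, Int.ofNat_eq_natCast]
      norm_num [Nat.testBit_xor, pv_tb_cast]
    | negSucc k =>
      simp only [PySem.Int.bxor, Int.ofNat_eq_natCast, pv_negSucc_inv]
      norm_num [pv_neg_coe_sub_one, pv_tb_negSucc, pv_tb_cast, Nat.testBit_xor,
        Int.negSucc_lt_zero, Bool.xor_not, Bool.not_xor]
  | negSucc m =>
    cases b with
    | ofNat k =>
      simp only [PySem.Int.bxor, Int.ofNat_eq_natCast, pv_negSucc_inv]
      norm_num [pv_neg_coe_sub_one, pv_tb_negSucc, pv_tb_cast, Nat.testBit_xor,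
        Int.negSucc_lt_zero, Bool.xor_not, Bool.not_xor]
    | negSucc k =>
      simp only [PySem.Int.bxor, pv_negSucc_inv]
      norm_num [pv_tb_negSucc, pv_tb_cast, Nat.testBit_xor, Int.negSucc_lt_zero]

-- borrow-free subtraction of a submask, bit by bit
lemma pv_sub_and_testBit (i : Nat) : ∀ c m : Nat,
    (c - (c &&& m)).testBit i = (c.testBit i && !m.testBit i) := by
  induction i with
  | zero =>
    intro c m
    have hd2 : (c &&& m) / 2 = c / 2 &&& m / 2 := by
      simpa [Nat.shiftRight_one] using (Nat.shiftRight_and_distrib (a := c) (b := m) (i := 1))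
    have hdm : (c &&& m) % 2 = c % 2 * (m % 2) := by
      have h0 := Nat.testBit_and c m 0
      simp only [Nat.testBit_zero] at h0
      rcases Nat.mod_two_eq_zero_or_one c with hc | hc <;>
        rcases Nat.mod_two_eq_zero_or_one m with hm | hm <;>
        rcases Nat.mod_two_eq_zero_or_one (c &&& m) with hcm | hcm <;>
        simp [hc, hm, hcm] at h0 ⊢
    have hd2le : (c &&& m) / 2 ≤ c / 2 := hd2 ▸ Nat.and_le_left
    simp only [Nat.testBit_zero]
    rw [Bool.eq_iff_iff]
    simp only [decide_eq_true_eq, Bool.and_eq_true, Bool.not_eq_true', decide_eq_false_iff_not]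
    rcases Nat.mod_two_eq_zero_or_one m with hm | hm <;> simp [hm] at hdm ⊢
    all_goals omega
  | succ i ih =>
    intro c m
    have hd2 : (c &&& m) / 2 = c / 2 &&& m / 2 := by
      simpa [Nat.shiftRight_one] using (Nat.shiftRight_and_distrib (a := c) (b := m) (i := 1))
    have hdm : (c &&& m) % 2 ≤ c % 2 := by
      have h0 := Nat.testBit_and c m 0
      simp only [Nat.testBit_zero] at h0
      rcases Nat.mod_two_eq_zero_or_one c with hc | hc <;>
        rcases Nat.mod_two_eq_zero_or_one (c &&& m) with hcm | hcm <;>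
        simp [hc, hcm] at h0 ⊢
    have hd2le : (c &&& m) / 2 ≤ c / 2 := hd2 ▸ Nat.and_le_left
    have hdiv : (c - (c &&& m)) / 2 = c / 2 - (c / 2 &&& m / 2) := by omega
    rw [Nat.testBit_add_one, Nat.testBit_add_one, Nat.testBit_add_one, hdiv]
    exact ih (c / 2) (m / 2)

lemma pv_tb_band (a : Int) (c i : Nat) :
    (PySem.Int.band a (c : Int)).testBit i = (a.testBit i && c.testBit i) := by
  cases a with
  | ofNat m =>
    simp only [PySem.Int.band, Int.ofNat_eq_natCast]
    norm_num [pv_tb_cast, Nat.testBit_and, Bool.and_comm]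
  | negSucc m =>
    simp only [PySem.Int.band, pv_negSucc_inv]
    norm_num [pv_tb_cast, pv_tb_negSucc, Int.negSucc_lt_zero]
    rw [pv_sub_and_testBit i c m]
    exact Bool.and_comm _ _

lemma pv_tb_255 (i : Nat) : (255 : Int).testBit i = decide (i < 8) := by
  have h := Nat.testBit_two_pow_sub_one 8 i
  norm_num at h
  exact h

-- the branch condition of the step only reads bit 0
lemma pv_band_one_bxor (hi u : Int) (h0 : hi.testBit 0 = false) :
    PySem.Int.band (PySem.Int.bxor hi u) 1 = PySem.Int.band u 1 := by
  apply pv_int_ext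
  intro i
  rw [show (1 : Int) = ((1 : Nat) : Int) from rfl, pv_tb_band, pv_tb_band]
  cases i with
  | zero => simp [pv_tb_bxor, h0]
  | succ n => simp [Nat.testBit_add_one]

lemma pvStep_split (hi u : Int) (h0 : hi.testBit 0 = false) :
    pvStep (PySem.Int.bxor hi u) = PySem.Int.bxor (hi >>> (1:Nat)) (pvStep u) := by
  unfold pvStep
  rw [pv_band_one_bxor hi u h0]
  split_ifs with hc <;>
    exact pv_int_ext fun i => by
      simp [pv_tb_bxor, pv_tb_shiftRight]

lemma pv_shiftRight_shiftRight (a : Int) (m n : Nat) : (a >>> m) >>> n = a >>> (m + n) := by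
  apply pv_int_ext
  intro i
  rw [pv_tb_shiftRight, pv_tb_shiftRight, pv_tb_shiftRight, Nat.add_assoc]

lemma pv_split (m : Nat) : ∀ hi u : Int, (∀ i, i < m → hi.testBit i = false) →
    pvIter pvStep m (PySem.Int.bxor hi u) = PySem.Int.bxor (hi >>> m) (pvIter pvStep m u) := by
  induction m with
  | zero =>
    intro hi u _
    show PySem.Int.bxor hi u = PySem.Int.bxor (hi >>> (0:Nat)) u
    cases hi <;> rfl
  | succ m ih =>
    intro hi u h
    show pvIter pvStep m (pvStep (PySem.Int.bxor hi u)) = _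
    rw [pvStep_split hi u (h 0 (Nat.succ_pos m)),
      ih (hi >>> (1:Nat)) (pvStep u) (fun i hi' => by
        rw [pv_tb_shiftRight]; exact h (1 + i) (by omega)),
      pv_shiftRight_shiftRight, Nat.add_comm 1 m]
    rfl

-- decomposition x = (x with low byte cleared) XOR (x & 255)
lemma pv_decomp (x : Int) :
    PySem.Int.bxor (PySem.Int.bxor x (PySem.Int.band x 255)) (PySem.Int.band x 255) = x := by
  apply pv_int_ext
  intro i
  simp [pv_tb_bxor]

lemma pv_hi_low_bits (x : Int) (i : Nat) (h : i < 8) :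
    (PySem.Int.bxor x (PySem.Int.band x 255)).testBit i = false := by
  rw [pv_tb_bxor, show (255 : Int) = ((255 : Nat) : Int) from rfl, pv_tb_band]
  rw [show Nat.testBit 255 i = decide (i < 8) from pv_tb_255 i]
  simp [h]

lemma pv_hi_shift (x : Int) :
    (PySem.Int.bxor x (PySem.Int.band x 255)) >>> (8:Nat) = x >>> (8:Nat) := by
  apply pv_int_ext
  intro i
  rw [pv_tb_shiftRight, pv_tb_shiftRight, pv_tb_bxor,
    show (255 : Int) = ((255 : Nat) : Int) from rfl, pv_tb_band,
    show Nat.testBit 255 (8 + i) = decide (8 + i < 8) from pv_tb_255 (8 + i)]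
  simp

-- one byte step of point-free CRC = 8 single-bit steps
lemma pv_byte (x : Int) :
    pvIter pvStep 8 x = PySem.Int.bxor (x >>> (8:Nat)) (pvIter pvStep 8 (PySem.Int.band x 255)) := by
  have h := pv_split 8 (PySem.Int.bxor x (PySem.Int.band x 255)) (PySem.Int.band x 255)
    (fun i hi => pv_hi_low_bits x i hi)
  rw [pv_decomp, pv_hi_shift] at h
  exact h

-- bounds of x & 255
lemma pv_band255_nonneg (x : Int) : 0 ≤ PySem.Int.band x 255 := by
  rw [PySem.Int.band_comm]
  exact PySem.Int.band_nonneg_of_nonneg_left x (by norm_num)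

lemma pv_band255_lt (x : Int) : PySem.Int.band x 255 < 256 := by
  cases x with
  | ofNat m =>
    rw [show (Int.ofNat m) = ((m : Nat) : Int) from rfl,
      show (255 : Int) = ((255 : Nat) : Int) from rfl, PySem.Int.band_natCast]
    have : m &&& 255 ≤ 255 := Nat.and_le_right
    omega
  | negSucc m =>
    simp only [PySem.Int.band, pv_negSucc_inv]
    norm_num [Int.negSucc_lt_zero]
    omega

-- table lookup computes 8 single-bit steps of the index
lemma pv_table (k : Nat) (hk : k < 256) :
    PySem.List.pyGetD pvCrcTable ((k : Nat) : Int) 0 = pvIter pvStep 8 ((k : Nat) : Int) := by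
  unfold pvCrcTable
  rw [show (256 : Int) = ((256 : Nat) : Int) from rfl,
    PySem.List.pyGetD_map_pyRange _ 256 k 0 hk]
  show List.foldl (fun a _ => pvStep a) _ (PySem.List.pyRange 0 8) = _
  rw [pvFoldl_iter pvStep]
  rfl

-- one byte step of B = 8 single-bit steps of A
lemma pv_bstep (x : Int) :
    PySem.Int.bxor (x >>> (8:Nat)) (PySem.List.pyGetD pvCrcTable (PySem.Int.band x 255) 0) =
      pvIter pvStep 8 x := by
  have h0 := pv_band255_nonneg x
  have h1 := pv_band255_lt x
  have hk : PySem.Int.band x 255 = (((PySem.Int.band x 255).toNat : Nat) : Int) :=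
    (Int.toNat_of_nonneg h0).symm
  rw [hk, pv_table (PySem.Int.band x 255).toNat (by omega), ← hk]
  exact (pv_byte x).symm

lemma pv_CRC_iter (x : Int) : CRC x = pvIter pvStep 32 x := by
  show List.foldl (fun a _ => pvStep a) x (PySem.List.pyRange 0 32) = _
  rw [pvFoldl_iter pvStep]
  rfl

lemma pv_CRC_alt_iter (x : Int) :
    CRC_alt x =
      pvIter (fun c => PySem.Int.bxor (c >>> (8:Nat)) (PySem.List.pyGetD pvCrcTable (PySem.Int.band c 255) 0)) 4 x := by
  show List.foldl (fun a _ =>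
      PySem.Int.bxor (a >>> (8:Nat)) (PySem.List.pyGetD pvCrcTable (PySem.Int.band a 255) 0))
      x (PySem.List.pyRange 0 4) = _
  rw [pvFoldl_iter]
  rfl

lemma pv_alt4 (x : Int) :
    pvIter (fun c => PySem.Int.bxor (c >>> (8:Nat)) (PySem.List.pyGetD pvCrcTable (PySem.Int.band c 255) 0)) 4 x
      = pvIter pvStep 32 x := by
  conv_lhs => simp only [pvIter]
  simp only [pv_bstep]
  rw [show (32 : Nat) = 8 + 8 + 8 + 8 from rfl, pvIter_add, pvIter_add, pvIter_add]

-- ===== VERDICT (by name: the statement is the Claim_ definition above) =====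
theorem CRC_spec : Claim_equal_CRC := by
  intro x _
  show CRC x = CRC_alt x
  rw [pv_CRC_iter, pv_CRC_alt_iter, pv_alt4]
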